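-- pv_equiv track=rewrite | github.com/kenzielizg/Cypher | PythonApplication1.py | keyAlphabet
-- ===== SOURCE A (Python) =====
-- def keyAlphabet(generator, original= 'abcdefghijklmnopqrstuvwxyz'):
-- 	"""
-- 	Generates a keyalphabet using a given word. Fallout76's method. removes letter in given word from alphabet
-- 		then appending said alphabet to given word
--
-- 	generator: the word used to make the keyalphabet. A word with repeat letters will shrink the set space making
-- 		decryption more difficult to impossible.
-- 	original: defaults to the alphabet; however maybe changed to anything to include other characters.
-- 	returns the new alphabet
-- 	"""
-- 	if len(generator) > len(original):
-- 		generator = generator[:len(original)]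
-- 	#idk if i actually need this part ^^^
-- 	#Im pretty sure I dont but I dont feel like testing it
--
-- 	#loop goes through letters in generator and removes from alphabet
-- 	for char in generator:
-- 		#str.index(substr) gives error if substring not found. try except handles it
-- 		try:
-- 			i = original.index(char)
-- 			#replace with .find(char)?
-- 		except:
-- 			#continue to next iteration of loop
-- 			continue
-- 		#if index found in original, use it to split into two substrings and
-- 		#	combine wihtout the letter
-- 		#	also pretty sure there a string method for this
-- 		#	str.replace(old, new)
-- 		original = original[:i] + original[i+1:]
-- 	return generator + original
-- ===== SOURCE B (Python) =====
-- def keyAlphabet(generator, original='abcdefghijklmnopqrstuvwxyz'):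
--     generator = generator[:len(original)]
--     counts = {}
--     for c in generator:
--         counts[c] = counts.get(c, 0) + 1
--     out = []
--     for c in original:
--         if counts.get(c, 0) > 0:
--             counts[c] = counts[c] - 1
--         else:
--             out.append(c)
--     return generator + ''.join(out)
-- ===== Notes on version B (the rewrite author's own statement) =====
-- stated objective: faster
-- what changed: Instead of A's generator-driven loop that repeatedly searches original with .index and rebuilds it by slicing, B builds a dict of generator letter counts once and makes a single pass over original, consuming each character against the decrementing counts and keeping the leftovers.
import Mathlib
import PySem

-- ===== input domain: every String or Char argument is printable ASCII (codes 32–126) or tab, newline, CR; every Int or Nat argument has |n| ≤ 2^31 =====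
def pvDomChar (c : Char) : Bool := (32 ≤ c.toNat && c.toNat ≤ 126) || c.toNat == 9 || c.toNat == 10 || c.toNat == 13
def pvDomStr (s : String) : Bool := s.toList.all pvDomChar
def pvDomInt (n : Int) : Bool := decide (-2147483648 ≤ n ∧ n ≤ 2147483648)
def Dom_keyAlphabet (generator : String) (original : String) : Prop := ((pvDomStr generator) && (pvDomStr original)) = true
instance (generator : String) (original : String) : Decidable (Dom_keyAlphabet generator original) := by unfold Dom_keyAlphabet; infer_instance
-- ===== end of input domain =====

-- B replaces A's generator-driven index/splice removal loop (quadratic rescans of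
-- `original`) with a dict of letter counts and a single pass over `original`.


-- ===== PORT A =====
-- one iteration of A's loop body: try original.index(char) (except: continue),
-- then original = original[:i] + original[i+1:]
def pvAStep (original : List Char) (ch : Char) : List Char :=
  match PySem.List.index? original ch with
  | none => original
  | some i =>
      PySem.List.slice original none (some (i : Int)) ++
      PySem.List.slice original (some ((i : Int) + 1)) none

def keyAlphabet (generator : String) (original : String) : String :=
  -- A iterates over the characters of the (possibly truncated) generator string;
  -- original.index(char) on a 1-char string is exactly index? on the char list
  let g : List Char :=
    if generator.toList.length > original.toList.length then
      PySem.List.slice generator.toList none (some (original.toList.length : Int))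
    else generator.toList
  let o : List Char := g.foldl pvAStep original.toList
  String.ofList (g ++ o)

-- ===== PORT B =====
def keyAlphabet_alt (generator : String) (original : String) : String :=
  let g : List Char :=
    PySem.List.slice generator.toList none (some (original.toList.length : Int))
  -- counts[c] = counts.get(c, 0) + 1
  let counts : PySem.Dict Char Int :=
    g.foldl (fun d c => d.insert c (d.getD c 0 + 1)) PySem.Dict.empty
  -- single pass over original with state (counts, out); counts[c] = counts[c] - 1
  -- is an insert at a key the guard counts.get(c, 0) > 0 shows is present
  let st : PySem.Dict Char Int × List Char :=
    original.toList.foldl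
      (fun st c =>
        if st.1.getD c 0 > 0 then (st.1.insert c (st.1.getD c 0 - 1), st.2)
        else (st.1, st.2 ++ [c]))
      (counts, [])
  String.ofList (g ++ st.2)

-- ===== PRECONDITION & SPEC =====
def Spec_keyAlphabet (generator : String) (original : String) (out : String) : Prop := out = keyAlphabet_alt generator original
instance (generator : String) (original : String) (out : String) : Decidable (Spec_keyAlphabet generator original out) := by unfold Spec_keyAlphabet; infer_instance

-- ===== CLAIM (what is proved, stated in full; the proofs are below) =====
def Claim_equal_keyAlphabet : Prop := ∀ (generator : String) (original : String), Dom_keyAlphabet generator original → Spec_keyAlphabet generator original (keyAlphabet generator original)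

-- ===== LEMMAS AND PROOFS =====

-- A's step removes the first occurrence of ch (or leaves the list unchanged)
theorem pvAStep_eq_erase (original : List Char) (ch : Char) :
    pvAStep original ch = original.erase ch := by
  unfold pvAStep
  rw [PySem.List.index?_eq_idxOf?]
  cases h : original.idxOf? ch with
  | none =>
      rw [List.erase_of_not_mem (List.idxOf?_eq_none_iff.mp h)]
  | some i =>
      rcases (PySem.List.index?_eq_some_iff original ch i).mp
        (by rw [PySem.List.index?_eq_idxOf?]; exact h) with ⟨pre, suf, hsplit, hlen, hnot⟩
      subst hsplit
      have h1 : ((i : Int) + 1) = ((i + 1 : Nat) : Int) := by push_cast; ring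
      dsimp only
      rw [PySem.List.slice_to_natCast, h1, PySem.List.slice_from_natCast]
      rw [List.erase_append]
      simp [hnot, List.erase_cons_head, ← hlen]

-- the kept characters of a single pass of `o` against the multiset `cnt`
def pvKeep (cnt : Char → Nat) : List Char → List Char
  | [] => []
  | c :: o' =>
      if cnt c > 0 then pvKeep (Function.update cnt c (cnt c - 1)) o'
      else c :: pvKeep cnt o'

theorem pvKeep_zero (o : List Char) : pvKeep (fun _ => 0) o = o := by
  induction o with
  | nil => rfl
  | cons c o' ih => simp [pvKeep, ih]

-- bumping one letter of the multiset ≡ erasing its first occurrence beforehand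
theorem pvKeep_bump (c : Char) (cnt : Char → Nat) (o : List Char) :
    pvKeep (Function.update cnt c (cnt c + 1)) o = pvKeep cnt (o.erase c) := by
  induction o generalizing cnt with
  | nil => rfl
  | cons d o' ih =>
      by_cases hdc : d = c
      · subst hdc
        rw [List.erase_cons_head, pvKeep]
        rw [if_pos (by simp)]
        have h1 : Function.update (Function.update cnt d (cnt d + 1)) d
            (Function.update cnt d (cnt d + 1) d - 1) = cnt := by
          funext x
          by_cases hx : x = d <;> simp [Function.update, hx]
        rw [h1]
      · have hcd : ¬ c = d := fun h => hdc h.symm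
        have hu : Function.update cnt c (cnt c + 1) d = cnt d :=
          Function.update_of_ne hdc _ _
        rw [List.erase_cons_tail (by simp [hdc])]
        by_cases hpos : cnt d > 0
        · rw [pvKeep, if_pos (by rw [hu]; exact hpos), pvKeep, if_pos hpos]
          have h2 : Function.update (Function.update cnt c (cnt c + 1)) d
                (Function.update cnt c (cnt c + 1) d - 1)
              = Function.update (Function.update cnt d (cnt d - 1)) c
                  (Function.update cnt d (cnt d - 1) c + 1) := by
            funext x
            by_cases hx : x = d
            · subst hx; simp [Function.update, hdc]
            · by_cases hxc : x = c <;>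
                simp [Function.update, hx, hxc, hcd]
          rw [h2, ih]
        · rw [pvKeep, if_neg (by rw [hu]; exact hpos), pvKeep, if_neg hpos, ih]

-- A's whole loop is the single pass against the generator's letter counts
theorem pvFoldA (g o : List Char) :
    g.foldl pvAStep o = pvKeep (fun x => g.count x) o := by
  induction g generalizing o with
  | nil => simp [pvKeep_zero, List.count_nil]
  | cons c g' ih =>
      rw [List.foldl_cons, pvAStep_eq_erase, ih, ← pvKeep_bump]
      congr 1
      funext x
      by_cases hx : x = c
      · subst hx; simp [Function.update]
      · simp [Function.update, hx, (Ne.symm hx : ¬ c = x)]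

-- B's fold computes the same pass, through the dict-counts invariant
theorem pvFoldB (o : List Char) (d : PySem.Dict Char Int) (acc : List Char)
    (cnt : Char → Nat) (hinv : ∀ x, d.getD x 0 = (cnt x : Int)) :
    (o.foldl
      (fun (st : PySem.Dict Char Int × List Char) c =>
        if st.1.getD c 0 > 0 then (st.1.insert c (st.1.getD c 0 - 1), st.2)
        else (st.1, st.2 ++ [c]))
      (d, acc)).2 = acc ++ pvKeep cnt o := by
  induction o generalizing d acc cnt with
  | nil => simp [pvKeep]
  | cons c o' ih =>
      by_cases hpos : cnt c > 0
      · have hd : d.getD c 0 > 0 := by rw [hinv]; exact_mod_cast hpos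
        rw [List.foldl_cons, if_pos hd, pvKeep, if_pos hpos]
        apply ih
        intro x
        rw [PySem.Dict.getD_insert]
        by_cases hx : x = c
        · subst hx
          rw [if_pos rfl, hinv, Function.update_self]
          omega
        · rw [if_neg hx, hinv, Function.update_of_ne hx]
      · have hd : ¬ d.getD c 0 > 0 := by rw [hinv]; exact_mod_cast hpos
        rw [List.foldl_cons, if_neg hd, pvKeep, if_neg hpos, ih _ _ _ hinv]
        simp

-- the counter dict built from g holds exactly g's letter counts
theorem pvCounts (g : List Char) (x : Char) :
    (g.foldl (fun d c => d.insert c (d.getD c 0 + 1)) PySem.Dict.empty).getD x 0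
      = (g.count x : Int) := by
  rw [PySem.Dict.getD_foldl_insert_add_one]
  simp

-- truncation: A truncates only when longer, B always slices; the results agree
theorem pvTrunc (g o : List Char) :
    (if g.length > o.length then PySem.List.slice g none (some (o.length : Int)) else g)
      = PySem.List.slice g none (some (o.length : Int)) := by
  rw [PySem.List.slice_to_natCast]
  split_ifs with h
  · rfl
  · rw [List.take_of_length_le (by omega)]

-- ===== VERDICT (by name: the statement is the Claim_ definition above) =====
theorem keyAlphabet_spec : Claim_equal_keyAlphabet := by
  intro generator original _
  show keyAlphabet generator original = keyAlphabet_alt generator original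
  unfold keyAlphabet keyAlphabet_alt
  rw [pvTrunc]
  simp only [pvFoldA,
    pvFoldB _ _ _ _ (pvCounts (PySem.List.slice generator.toList none
      (some (original.toList.length : Int)))),
    List.nil_append]
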